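-- pv_equiv track=rewrite | github.com/czfyy/Think-Python-2ed | ThinkPython_Exercise9.5.py | use_all
-- ===== SOURCE A (Python) =====
-- def use_all(word, mystring):
--     for letter in word:
--         if letter in mystring:
--             i = mystring.find(letter)
--             mystring = mystring[:i] + mystring[i+1:]
--     if len(mystring) == 0:
--         return True
--     else:
--         return False
-- ===== SOURCE B (Python) =====
-- def use_all(word, mystring):
--     # Sort both; one merge pass checks mystring is a sub-multiset of word.
--     w = sorted(word)
--     m = sorted(mystring)
--     i = 0
--     for ch in m:
--         while i < len(w) and w[i] != ch:
--             i += 1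
--         if i == len(w):
--             return False
--         i += 1
--     return True
-- ===== Notes on version B (the rewrite author's own statement) =====
-- stated objective: faster
-- what changed: Replaces A's repeated find-and-remove rebuilding of mystring with sorting both strings once and a single two-pointer merge pass checking sub-multiset inclusion.
import Mathlib
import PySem

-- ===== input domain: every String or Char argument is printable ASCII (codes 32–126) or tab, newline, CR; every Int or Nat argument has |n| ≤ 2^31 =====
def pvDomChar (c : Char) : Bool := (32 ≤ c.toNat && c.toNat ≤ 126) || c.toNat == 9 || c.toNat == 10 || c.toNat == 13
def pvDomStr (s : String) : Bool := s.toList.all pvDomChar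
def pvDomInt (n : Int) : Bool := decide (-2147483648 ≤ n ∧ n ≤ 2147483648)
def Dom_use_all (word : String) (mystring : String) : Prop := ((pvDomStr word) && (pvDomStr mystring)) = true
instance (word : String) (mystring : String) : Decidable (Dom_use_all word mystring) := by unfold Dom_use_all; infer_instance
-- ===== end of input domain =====

-- B sorts both strings once and checks sub-multiset inclusion by one two-pointer
-- merge pass, instead of A's repeated find-and-remove rebuilding of mystring
-- (alternative algorithm; equal return value proved below).

-- ===== PORT A =====
-- one iteration of A's loop body; 'mystring.find(letter)' for a single character
-- known to be present is the first index, ported as List.idxOf (exact here).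
def useAllStep (m : List Char) (letter : Char) : List Char :=
  if letter ∈ m then
    let i : Int := (List.idxOf letter m : Int)
    PySem.List.slice m none (some i) ++ PySem.List.slice m (some (i + 1)) none
  else m

def use_all (word : String) (mystring : String) : Bool :=
  if (word.toList.foldl useAllStep mystring.toList).length = 0 then true else false

-- ===== PORT B =====
-- the two-pointer walk of Source B: advance through sorted word until the current
-- character of sorted mystring is matched; running off the end means False.
def mergeCheck : List Char → List Char → Bool
  | _, [] => true
  | [], _ :: _ => false
  | a :: ws, c :: ms => if a = c then mergeCheck ws ms else mergeCheck ws (c :: ms)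

def use_all_alt (word : String) (mystring : String) : Bool :=
  mergeCheck (PySem.List.sorted word.toList (fun c => c) false)
             (PySem.List.sorted mystring.toList (fun c => c) false)

-- ===== PRECONDITION & SPEC =====
def Spec_use_all (word : String) (mystring : String) (out : Bool) : Prop := out = use_all_alt word mystring
instance (word : String) (mystring : String) (out : Bool) : Decidable (Spec_use_all word mystring out) := by unfold Spec_use_all; infer_instance

-- ===== CLAIM (what is proved, stated in full; the proofs are below) =====
def Claim_equal_use_all : Prop := ∀ (word : String) (mystring : String), Dom_use_all word mystring → Spec_use_all word mystring (use_all word mystring)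

-- ===== LEMMAS AND PROOFS =====

theorem take_drop_idxOf_erase (c : Char) (m : List Char) (h : c ∈ m) :
    m.take (List.idxOf c m) ++ m.drop (List.idxOf c m + 1) = m.erase c := by
  induction m with
  | nil => cases h
  | cons x xs ih =>
    by_cases hx : x = c
    · subst hx
      simp
    · have hc : c ∈ xs := by
        rcases List.mem_cons.mp h with h' | h'
        · exact absurd h'.symm hx
        · exact h'
      have hidx : List.idxOf c (x :: xs) = List.idxOf c xs + 1 := by
        simp [hx]
      rw [hidx]
      simp only [List.take_succ_cons, List.drop_succ_cons, List.cons_append]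
      rw [ih hc, List.erase_cons_tail]
      simp [hx]

theorem useAllStep_eq_erase (m : List Char) (c : Char) : useAllStep m c = m.erase c := by
  by_cases h : c ∈ m
  · have h1 : PySem.List.slice m none (some ((List.idxOf c m : Nat) : Int)) =
        m.take (List.idxOf c m) := PySem.List.slice_to_natCast m _
    have h2 : PySem.List.slice m (some (((List.idxOf c m : Nat) : Int) + 1)) none =
        m.drop (List.idxOf c m + 1) := by
      have : ((List.idxOf c m : Nat) : Int) + 1 = ((List.idxOf c m + 1 : Nat) : Int) := by
        push_cast; ring
      rw [this, PySem.List.slice_from_natCast]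
    simp only [useAllStep, if_pos h]
    rw [h1, h2, take_drop_idxOf_erase c m h]
  · simp [useAllStep, h, List.erase_of_not_mem h]

theorem foldl_useAllStep_diff (w m : List Char) :
    w.foldl useAllStep m = m.diff w := by
  induction w generalizing m with
  | nil => simp
  | cons a ws ih => simp [List.foldl_cons, useAllStep_eq_erase, ih, List.diff_cons]

theorem diff_eq_nil_iff_subperm (m w : List Char) : m.diff w = [] ↔ m.Subperm w := by
  constructor
  · intro h
    rw [List.subperm_ext_iff]
    intro x _
    have := List.count_diff x m w
    rw [h] at this
    simp at this
    omega
  · intro h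
    rw [List.subperm_ext_iff] at h
    apply List.eq_nil_iff_forall_not_mem.mpr
    intro x hx
    have hm : x ∈ m := List.diff_subset m w hx
    have hc : List.count x (m.diff w) = 0 := by
      rw [List.count_diff]
      have := h x hm
      omega
    exact (List.count_eq_zero.mp hc) hx

theorem head_le_of_pairwise {c x : Char} {ms : List Char}
    (h : List.Pairwise (fun a b => a ≤ b) (c :: ms)) (hx : x ∈ c :: ms) : c ≤ x := by
  rcases List.mem_cons.mp hx with h' | h'
  · exact h'.symm ▸ le_refl c
  · exact (List.pairwise_cons.mp h).1 x h'

theorem mergeCheck_iff_subperm (w m : List Char)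
    (hw : List.Pairwise (fun a b => a ≤ b) w)
    (hm : List.Pairwise (fun a b => a ≤ b) m) :
    mergeCheck w m = true ↔ m.Subperm w := by
  induction w generalizing m with
  | nil =>
    cases m with
    | nil => simp [mergeCheck]
    | cons c ms =>
      simp only [mergeCheck, Bool.false_eq_true, false_iff]
      intro h
      have := h.length_le
      simp at this
  | cons a ws ih =>
    cases m with
    | nil => simp [mergeCheck]
    | cons c ms =>
      have hw' := (List.pairwise_cons.mp hw).2
      by_cases hac : a = c
      · subst hac
        have hred : mergeCheck (a :: ws) (a :: ms) = mergeCheck ws ms := by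
          simp [mergeCheck]
        rw [hred, ih ms hw' (List.pairwise_cons.mp hm).2, ← List.subperm_cons a]
      · simp only [mergeCheck, if_neg hac]
        rw [ih (c :: ms) hw' hm]
        constructor
        · intro h
          exact h.trans (List.sublist_cons_self a ws).subperm
        · intro h
          have hcmem : c ∈ a :: ws := h.subset (List.mem_cons_self)
          have hcws : c ∈ ws := by
            rcases List.mem_cons.mp hcmem with h' | h'
            · exact absurd h'.symm hac
            · exact h'
          have hac' : a < c :=
            lt_of_le_of_ne ((List.pairwise_cons.mp hw).1 c hcws) hac
          rw [List.subperm_ext_iff] at h ⊢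
          intro x hx
          have hcx : c ≤ x := head_le_of_pairwise hm hx
          have hxa : x ≠ a := fun he => absurd (he ▸ hcx) (not_le.mpr hac')
          have := h x hx
          rwa [List.count_cons_of_ne (Ne.symm hxa)] at this

theorem use_all_eq_subperm (word mystring : String) :
    use_all word mystring = true ↔ mystring.toList.Subperm word.toList := by
  unfold use_all
  rw [foldl_useAllStep_diff, ← diff_eq_nil_iff_subperm, ← List.length_eq_zero_iff]
  split_ifs with hh <;> simp [hh]

theorem use_all_alt_eq_subperm (word mystring : String) :
    use_all_alt word mystring = true ↔ mystring.toList.Subperm word.toList := by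
  unfold use_all_alt
  rw [mergeCheck_iff_subperm _ _
        (PySem.List.sorted_pairwise word.toList (fun c => c))
        (PySem.List.sorted_pairwise mystring.toList (fun c => c))]
  rw [(PySem.List.sorted_perm mystring.toList (fun c => c) false).subperm_right,
      (PySem.List.sorted_perm word.toList (fun c => c) false).subperm_left]

-- ===== VERDICT (by name: the statement is the Claim_ definition above) =====
theorem use_all_spec : Claim_equal_use_all := by
  intro word mystring _
  unfold Spec_use_all
  rw [Bool.eq_iff_iff, use_all_eq_subperm, use_all_alt_eq_subperm]
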